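-- pv_equiv track=rewrite | github.com/thorstenkramm/oma | mysql_info.py | encode_database_name
-- ===== SOURCE A (Python) =====
-- def encode_database_name(name: str) -> str:
--     """
--     Encode database name according to MySQL's filesystem naming rules.
--     MySQL encodes special characters when creating directories on the filesystem.
--     For example:
--     - Hyphen (-) becomes @002d
--     - Period (.) becomes @002e
--     - Space ( ) becomes @0020
--
--     Args:
--         name: The database name as it appears in MySQL
--
--     Returns:
--         The encoded name as it appears on the filesystem
--     """
--     # Process each character individually to avoid double-encoding issues
--     encoded = []
--
--     for char in name:
--         # Check if this character needs encoding
--         if char == '-':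
--             encoded.append('@002d')  # Hyphen/dash
--         elif char == '.':
--             encoded.append('@002e')  # Period
--         elif char == ' ':
--             encoded.append('@0020')  # Space
--         elif char == '$':
--             encoded.append('@0024')  # Dollar sign
--         elif char == '!':
--             encoded.append('@0021')  # Exclamation mark
--         elif char == '#':
--             encoded.append('@0023')  # Hash/pound
--         elif char == '%':
--             encoded.append('@0025')  # Percent
--         elif char == '&':
--             encoded.append('@0026')  # Ampersand
--         elif char == '(':
--             encoded.append('@0028')  # Left parenthesis
--         elif char == ')':
--             encoded.append('@0029')  # Right parenthesis
--         elif char == '*':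
--             encoded.append('@002a')  # Asterisk
--         elif char == '+':
--             encoded.append('@002b')  # Plus
--         elif char == ',':
--             encoded.append('@002c')  # Comma
--         elif char == '/':
--             encoded.append('@002f')  # Forward slash
--         elif char == ':':
--             encoded.append('@003a')  # Colon
--         elif char == ';':
--             encoded.append('@003b')  # Semicolon
--         elif char == '<':
--             encoded.append('@003c')  # Less than
--         elif char == '=':
--             encoded.append('@003d')  # Equals
--         elif char == '>':
--             encoded.append('@003e')  # Greater than
--         elif char == '?':
--             encoded.append('@003f')  # Question mark
--         elif char == '@':
--             encoded.append('@0040')  # At sign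
--         elif char == '[':
--             encoded.append('@005b')  # Left square bracket
--         elif char == '\\':
--             encoded.append('@005c')  # Backslash
--         elif char == ']':
--             encoded.append('@005d')  # Right square bracket
--         elif char == '^':
--             encoded.append('@005e')  # Caret
--         elif char == '{':
--             encoded.append('@007b')  # Left curly brace
--         elif char == '|':
--             encoded.append('@007c')  # Pipe
--         elif char == '}':
--             encoded.append('@007d')  # Right curly brace
--         elif char == '~':
--             encoded.append('@007e')  # Tilde
--         else:
--             # Keep the character as-is
--             encoded.append(char)
--
--     return ''.join(encoded)
-- ===== SOURCE B (Python) =====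
-- SPECIALS = '@-. $!#%&()*+,/:;<=>?[\\]^{|}~'  # '@' first, so escape markers introduced later are never re-encoded
--
-- def encode_database_name(name: str) -> str:
--     # Staged whole-string rewriting: one replace pass per special character,
--     # each escape computed from the character's codepoint.
--     for ch in SPECIALS:
--         name = name.replace(ch, '@{:04x}'.format(ord(ch)))
--     return name
-- ===== Notes on version B (the rewrite author's own statement) =====
-- stated objective: alternative
-- what changed: Instead of A's single character-by-character pass through a 29-branch elif chain of hard-coded escape literals, B makes 29 whole-string replace passes, one per special character with its escape computed from the codepoint, ordering the at-sign first so escapes introduced by later passes are never re-encoded.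
import Mathlib
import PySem

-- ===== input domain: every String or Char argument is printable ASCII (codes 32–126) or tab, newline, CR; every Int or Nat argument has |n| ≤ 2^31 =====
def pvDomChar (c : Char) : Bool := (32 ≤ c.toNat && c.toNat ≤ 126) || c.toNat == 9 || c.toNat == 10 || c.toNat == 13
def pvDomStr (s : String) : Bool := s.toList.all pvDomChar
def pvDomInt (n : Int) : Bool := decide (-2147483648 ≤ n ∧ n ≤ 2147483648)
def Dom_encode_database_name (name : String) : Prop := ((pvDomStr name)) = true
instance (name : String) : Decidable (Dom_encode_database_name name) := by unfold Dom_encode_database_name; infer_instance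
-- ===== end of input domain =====

-- B replaces A's single pass with a 29-branch elif chain per character by 29 whole-string
-- replace passes ('@' first so later escapes are never re-encoded), each escape computed
-- from the codepoint; alternative decomposition, same result.

-- ===== PORT A =====
-- A's per-character elif chain, transliterated branch for branch.
def pvEncCharA (c : Char) : String :=
  if c = '-' then "@002d" else
  if c = '.' then "@002e" else
  if c = ' ' then "@0020" else
  if c = '$' then "@0024" else
  if c = '!' then "@0021" else
  if c = '#' then "@0023" else
  if c = '%' then "@0025" else
  if c = '&' then "@0026" else
  if c = '(' then "@0028" else
  if c = ')' then "@0029" else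
  if c = '*' then "@002a" else
  if c = '+' then "@002b" else
  if c = ',' then "@002c" else
  if c = '/' then "@002f" else
  if c = ':' then "@003a" else
  if c = ';' then "@003b" else
  if c = '<' then "@003c" else
  if c = '=' then "@003d" else
  if c = '>' then "@003e" else
  if c = '?' then "@003f" else
  if c = '@' then "@0040" else
  if c = '[' then "@005b" else
  if c = '\\' then "@005c" else
  if c = ']' then "@005d" else
  if c = '^' then "@005e" else
  if c = '{' then "@007b" else
  if c = '|' then "@007c" else
  if c = '}' then "@007d" else
  if c = '~' then "@007e" else
  String.singleton c

def encode_database_name (name : String) : String :=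
  PySem.Str.join "" (name.toList.foldl (fun acc c => acc ++ [pvEncCharA c]) [])

-- ===== PORT B =====
-- B's ordered string of special characters ('@' first, as in Source B).
def pvSpecials : List Char :=
  ['@', '-', '.', ' ', '$', '!', '#', '%', '&', '(', ')', '*', '+', ',', '/', ':', ';', '<', '=', '>', '?', '[', '\\', ']', '^', '{', '|', '}', '~']

-- '{:04x}'.format(n) for n < 0x10000: lowercase hex, zero-padded to 4 digits.
def pvHexDigit (n : Nat) : Char :=
  if n < 10 then Char.ofNat (48 + n) else Char.ofNat (87 + n)

def pvEscChars (c : Char) : List Char :=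
  ['@', pvHexDigit (c.toNat / 4096 % 16), pvHexDigit (c.toNat / 256 % 16),
   pvHexDigit (c.toNat / 16 % 16), pvHexDigit (c.toNat % 16)]

def encode_database_name_alt (name : String) : String :=
  pvSpecials.foldl
    (fun s ch => PySem.Str.replace s (String.singleton ch) (String.ofList (pvEscChars ch))) name

-- ===== PRECONDITION & SPEC =====
def Spec_encode_database_name (name : String) (out : String) : Prop := out = encode_database_name_alt name
instance (name : String) (out : String) : Decidable (Spec_encode_database_name name out) := by unfold Spec_encode_database_name; infer_instance

-- ===== CLAIM (what is proved, stated in full; the proofs are below) =====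
def Claim_equal_encode_database_name : Prop := ∀ (name : String), Dom_encode_database_name name → Spec_encode_database_name name (encode_database_name name)

-- ===== LEMMAS AND PROOFS =====

-- substitution of a single char, as a per-character map
def pvSub (p : Char) (r : List Char) (c : Char) : List Char := if c = p then r else [c]

-- encoding relative to a set S of already-processed specials
def pvF (S : List Char) (c : Char) : List Char := if c ∈ S then pvEscChars c else [c]

-- the alphabet escape strings are built from
def pvEscAlphabet : List Char := '@' :: "0123456789abcdef".toList

theorem pvHexDigit_mem : ∀ n, n < 16 → pvHexDigit n ∈ pvEscAlphabet := by decide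

theorem pvEscChars_subset (c : Char) : ∀ d ∈ pvEscChars c, d ∈ pvEscAlphabet := by
  intro d hd
  simp only [pvEscChars, List.mem_cons, List.not_mem_nil, or_false] at hd
  rcases hd with h | h | h | h | h
  · simp [h, pvEscAlphabet]
  all_goals subst h
  all_goals exact pvHexDigit_mem _ (Nat.mod_lt _ (by norm_num))

-- replace with a single-character pattern is a per-character substitution
theorem replace_go_single (p : Char) (r : List Char) :
    ∀ (l : List Char) (fuel : Nat) (acc : List Char), l.length ≤ fuel →
      PySem.Chars.replace.go [p] r fuel l acc = acc.reverse ++ l.flatMap (pvSub p r) := by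
  intro l
  induction l with
  | nil => intro fuel acc _; cases fuel <;> simp [PySem.Chars.replace.go]
  | cons c t ih =>
    intro fuel acc hf
    cases fuel with
    | zero => simp at hf
    | succ f =>
      rw [PySem.Chars.replace.go]
      by_cases h : c = p
      · subst h
        have hpre : [c].isPrefixOf (c :: t) = true := by simp [List.isPrefixOf]
        simp only [hpre, if_pos]
        rw [show List.drop [c].length (c :: t) = t from rfl]
        rw [ih f _ (by simpa using hf)]
        simp [pvSub]
      · have hpre : [p].isPrefixOf (c :: t) = false := by
          simp [List.isPrefixOf]; exact fun hc => absurd hc.symm h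
        simp only [hpre, Bool.false_eq_true, if_neg, not_false_iff]
        rw [ih f _ (by simpa using hf)]
        simp [pvSub, h]

theorem replace_single (p : Char) (r : List Char) (s : List Char) :
    PySem.Chars.replace s [p] r = s.flatMap (pvSub p r) := by
  rw [PySem.Chars.replace]
  simp only [List.isEmpty_cons, Bool.false_eq_true, if_neg, not_false_iff]
  simpa using replace_go_single p r s s.length [] le_rfl

-- substituting a char that does not occur in a list leaves it unchanged
theorem flatMap_sub_of_not_mem (p : Char) (r : List Char) (l : List Char) (h : p ∉ l) :
    l.flatMap (pvSub p r) = l := by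
  induction l with
  | nil => rfl
  | cons c t ih =>
    simp only [List.mem_cons, not_or] at h
    simp [pvSub, Ne.symm h.1, ih h.2]

-- one replace pass moves a special from 'todo' into the processed set
theorem step_lemma (name : List Char) (S : List Char) (ch : Char) (hch : ch ∉ pvEscAlphabet) :
    (name.flatMap (pvF S)).flatMap (pvSub ch (pvEscChars ch)) = name.flatMap (pvF (S ++ [ch])) := by
  rw [List.flatMap_assoc]
  apply List.flatMap_congr
  intro c _
  by_cases hc : c ∈ S
  · have : pvF S c = pvEscChars c := by simp [pvF, hc]
    rw [this, flatMap_sub_of_not_mem _ _ _ (fun hmem => hch (pvEscChars_subset c ch hmem))]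
    simp [pvF, hc]
  · have : pvF S c = [c] := by simp [pvF, hc]
    rw [this]
    by_cases he : c = ch
    · subst he; simp [pvSub, pvF]
    · simp [pvSub, he, pvF, hc]

-- the fold of replace passes computes the per-character encoding w.r.t. the full set
theorem fold_lemma (todo : List Char) :
    ∀ (S : List Char) (name : List Char), (∀ ch ∈ todo, ch ∉ pvEscAlphabet) →
      todo.foldl (fun s ch => PySem.Chars.replace s [ch] (pvEscChars ch)) (name.flatMap (pvF S))
        = name.flatMap (pvF (S ++ todo)) := by
  induction todo with
  | nil => intro S name _; simp
  | cons ch rest ih =>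
    intro S name h
    simp only [List.foldl_cons]
    rw [replace_single, step_lemma name S ch (h ch (by simp))]
    rw [ih (S ++ [ch]) name (fun c hc => h c (by simp [hc]))]
    simp

-- per-character agreement: A's elif chain equals pvF over the full specials set
theorem encCharA_eq (c : Char) : (pvEncCharA c).toList = pvF pvSpecials c := by
  by_cases h : c ∈ pvSpecials
  · simp only [pvSpecials, List.mem_cons, List.not_mem_nil, or_false] at h
    rcases h with rfl|rfl|rfl|rfl|rfl|rfl|rfl|rfl|rfl|rfl|rfl|rfl|rfl|rfl|rfl|rfl|rfl|rfl|rfl|rfl|rfl|rfl|rfl|rfl|rfl|rfl|rfl|rfl|rfl <;> decide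
  · simp only [pvSpecials, List.mem_cons, List.not_mem_nil, or_false, not_or] at h
    obtain ⟨h1, h2, h3, h4, h5, h6, h7, h8, h9, h10, h11, h12, h13, h14, h15, h16, h17, h18, h19, h20, h21, h22, h23, h24, h25, h26, h27, h28, h29⟩ := h
    simp [pvEncCharA, pvF, pvSpecials, h1, h2, h3, h4, h5, h6, h7, h8, h9, h10,
      h11, h12, h13, h14, h15, h16, h17, h18, h19, h20, h21, h22, h23, h24, h25, h26, h27, h28, h29]

-- B's String-level fold, pushed down to char lists
theorem alt_toList (name : String) :
    (encode_database_name_alt name).toList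
      = pvSpecials.foldl (fun s ch => PySem.Chars.replace s [ch] (pvEscChars ch)) name.toList := by
  unfold encode_database_name_alt
  generalize pvSpecials = L
  induction L generalizing name with
  | nil => rfl
  | cons ch rest ih =>
    simp only [List.foldl_cons]
    rw [ih]
    simp [PySem.Str.toList_replace]

set_option maxRecDepth 100000 in
theorem specials_tail_not_in_alphabet : ∀ ch ∈ pvSpecials.tail, ch ∉ pvEscAlphabet := by
  intro ch h
  simp only [pvSpecials, List.tail_cons, List.mem_cons, List.not_mem_nil, or_false] at h
  rcases h with rfl|rfl|rfl|rfl|rfl|rfl|rfl|rfl|rfl|rfl|rfl|rfl|rfl|rfl|rfl|rfl|rfl|rfl|rfl|rfl|rfl|rfl|rfl|rfl|rfl|rfl|rfl|rfl <;> decide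

theorem chars_join_nil_flatten (l : List (List Char)) : PySem.Chars.join [] l = l.flatten := by
  induction l with
  | nil => rfl
  | cons a t ih =>
    cases t with
    | nil => simp [PySem.Chars.join, List.intercalate]
    | cons b t2 => simp_all [PySem.Chars.join, List.intercalate, List.intersperse]

-- ===== VERDICT (by name: the statement is the Claim_ definition above) =====
theorem encode_database_name_spec : Claim_equal_encode_database_name := by
  intro name _
  unfold Spec_encode_database_name
  have hA : (encode_database_name name).toList = name.toList.flatMap (pvF pvSpecials) := by
    unfold encode_database_name
    rw [PySem.List.foldl_append_singleton_eq_map]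
    rw [PySem.Str.toList_join]
    simp only [List.nil_append, List.map_map]
    rw [show ("".toList : List Char) = [] from rfl, chars_join_nil_flatten]
    rw [List.flatMap_def]
    congr 1
    exact List.map_congr_left (fun c _ => encCharA_eq c)
  have hB : (encode_database_name_alt name).toList = name.toList.flatMap (pvF pvSpecials) := by
    rw [alt_toList]
    rw [show pvSpecials = '@' :: pvSpecials.tail from rfl]
    simp only [List.foldl_cons]
    rw [replace_single]
    rw [show name.toList.flatMap (pvSub '@' (pvEscChars '@')) = name.toList.flatMap (pvF ['@'])
          from List.flatMap_congr (fun c _ => by by_cases hc : c = '@' <;> simp [pvSub, pvF, hc])]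
    rw [fold_lemma pvSpecials.tail ['@'] name.toList specials_tail_not_in_alphabet]
    rfl
  have : (encode_database_name name).toList = (encode_database_name_alt name).toList := by
    rw [hA, hB]
  exact String.toList_inj.mp this
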